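-- pv_equiv track=rewrite | github.com/AmanTheOMA/ai110-module1show-gameglitchinvestigator-starter | logic_utils.py | _derive_bounds
-- ===== SOURCE A (Python) =====
-- from typing import Iterable, Tuple
--
-- def _derive_bounds(low: int, high: int, history: Iterable[tuple[int, str]]) -> tuple[int, int]:
--     """Infer current valid bounds from hint history."""
--     min_possible = low
--     max_possible = high
--     for guess, outcome in history:
--         if outcome == "Too Low":
--             min_possible = max(min_possible, guess + 1)
--         elif outcome == "Too High":
--             max_possible = min(max_possible, guess - 1)
--     return min_possible, max_possible
-- ===== SOURCE B (Python) =====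
-- from typing import Iterable, Tuple
--
-- def _derive_bounds(low: int, high: int, history: Iterable[tuple[int, str]]) -> tuple[int, int]:
--     """Infer current valid bounds from hint history.
--
--     Divide-and-conquer: each half of the history yields a bounds pair on its
--     own; pairs merge by (max, min), which is associative/commutative/idempotent,
--     so the split order cannot change the result.
--     """
--     hist = list(history)
--
--     def solve(i: int, j: int) -> tuple[int, int]:
--         if j - i == 0:
--             return (low, high)
--         if j - i == 1:
--             guess, outcome = hist[i]
--             if outcome == "Too Low":
--                 return (max(low, guess + 1), high)
--             if outcome == "Too High":
--                 return (low, min(high, guess - 1))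
--             return (low, high)
--         m = (i + j) // 2
--         a1, b1 = solve(i, m)
--         a2, b2 = solve(m, j)
--         return (max(a1, a2), min(b1, b2))
--
--     return solve(0, len(hist))
-- ===== Notes on version B (the rewrite author's own statement) =====
-- stated objective: alternative
-- what changed: Replaces A's single left-to-right min/max-updating scan with a divide-and-conquer recursion: each half of the history is solved independently to a bounds pair and the two pairs are merged by (max, min), which is associative, commutative and idempotent, so the result is order-independent.
import Mathlib
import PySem

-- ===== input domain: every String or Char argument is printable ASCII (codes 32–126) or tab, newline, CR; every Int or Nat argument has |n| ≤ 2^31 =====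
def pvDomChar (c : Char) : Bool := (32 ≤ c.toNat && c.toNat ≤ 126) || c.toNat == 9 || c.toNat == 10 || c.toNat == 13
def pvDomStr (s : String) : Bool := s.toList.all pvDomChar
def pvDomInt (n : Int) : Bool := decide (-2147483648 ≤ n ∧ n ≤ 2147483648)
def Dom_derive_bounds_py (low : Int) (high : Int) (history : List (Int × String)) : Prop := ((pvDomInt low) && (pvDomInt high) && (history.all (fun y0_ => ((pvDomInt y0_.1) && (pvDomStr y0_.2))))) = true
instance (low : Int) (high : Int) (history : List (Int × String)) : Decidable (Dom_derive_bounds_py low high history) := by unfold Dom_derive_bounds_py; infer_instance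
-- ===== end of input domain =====

-- B replaces A's single left-to-right min/max scan by a divide-and-conquer recursion whose halves merge by (max, min) (alternative decomposition, same cost); return value only.


-- ===== PORT A =====
-- Transliteration of A: single scan keeping (min_possible, max_possible).
def derive_bounds_py (low : Int) (high : Int) (history : List (Int × String)) : Int × Int :=
  history.foldl
    (fun st p =>
      if p.2 == "Too Low" then (max st.1 (p.1 + 1), st.2)
      else if p.2 == "Too High" then (st.1, min st.2 (p.1 - 1))
      else st)
    (low, high)

-- ===== PORT B =====
-- B's inner solve(i, j): divide and conquer over hist[i:j].
-- hist[i]? with i always in range in B's recursion; 'none' is a totality guard only.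
def solveDB (low : Int) (high : Int) (hist : List (Int × String)) (i j : Nat) : Int × Int :=
  if j - i = 0 then (low, high)
  else if j - i = 1 then
    match hist[i]? with
    | none => (low, high)
    | some (guess, outcome) =>
      if outcome == "Too Low" then (max low (guess + 1), high)
      else if outcome == "Too High" then (low, min high (guess - 1))
      else (low, high)
  else
    let m := (i + j) / 2
    let p1 := solveDB low high hist i m
    let p2 := solveDB low high hist m j
    (max p1.1 p2.1, min p1.2 p2.2)
termination_by j - i
decreasing_by all_goals omega

def derive_bounds_py_alt (low : Int) (high : Int) (history : List (Int × String)) : Int × Int :=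
  let hist := history
  solveDB low high hist 0 hist.length

-- ===== PRECONDITION & SPEC =====
def Spec_derive_bounds_py (low : Int) (high : Int) (history : List (Int × String)) (out : Int × Int) : Prop := out = derive_bounds_py_alt low high history
instance (low : Int) (high : Int) (history : List (Int × String)) (out : Int × Int) : Decidable (Spec_derive_bounds_py low high history out) := by unfold Spec_derive_bounds_py; infer_instance

-- ===== CLAIM (what is proved, stated in full; the proofs are below) =====
def Claim_equal_derive_bounds_py : Prop := ∀ (low : Int) (high : Int) (history : List (Int × String)), Dom_derive_bounds_py low high history → Spec_derive_bounds_py low high history (derive_bounds_py low high history)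

-- ===== LEMMAS AND PROOFS =====

-- One step of A's fold.
lemma step_cons (a b : Int) (p : Int × String) (t : List (Int × String)) :
    derive_bounds_py a b (p :: t) =
      if p.2 = "Too Low" then derive_bounds_py (max a (p.1 + 1)) b t
      else if p.2 = "Too High" then derive_bounds_py a (min b (p.1 - 1)) t
      else derive_bounds_py a b t := by
  simp only [derive_bounds_py, List.foldl_cons, beq_iff_eq]
  split_ifs <;> rfl

-- A's fold only moves the state monotonically.
lemma fold_mono (l : List (Int × String)) (a b : Int) :
    a ≤ (derive_bounds_py a b l).1 ∧ (derive_bounds_py a b l).2 ≤ b := by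
  induction l generalizing a b with
  | nil => simp [derive_bounds_py]
  | cons p t ih =>
    rw [step_cons]
    split_ifs with h1 h2
    · exact ⟨le_trans (le_max_left _ _) (ih _ _).1, (ih _ _).2⟩
    · exact ⟨(ih _ _).1, le_trans (ih _ _).2 (min_le_left _ _)⟩
    · exact ih a b

-- Running A's fold from a tighter state: the base combines by (max, min).
lemma fold_base (l : List (Int × String)) (a b a' b' : Int) (ha : a ≤ a') (hb : b' ≤ b) :
    derive_bounds_py a' b' l = (max a' (derive_bounds_py a b l).1, min b' (derive_bounds_py a b l).2) := by
  induction l generalizing a b a' b' with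
  | nil =>
    simp only [derive_bounds_py, List.foldl_nil]
    rw [max_eq_left ha, min_eq_left hb]
  | cons p t ih =>
    rw [step_cons, step_cons]
    split_ifs with h1 h2
    · have hx : (p.1 + 1) ≤ (derive_bounds_py (max a (p.1 + 1)) b t).1 :=
        le_trans (le_max_right _ _) (fold_mono t _ _).1
      rw [ih _ _ _ _ (max_le_max_right _ ha) hb, max_assoc, max_eq_right hx]
    · have hx : (derive_bounds_py a (min b (p.1 - 1)) t).2 ≤ (p.1 - 1) :=
        le_trans (fold_mono t _ _).2 (min_le_right _ _)
      rw [ih _ _ _ _ ha (min_le_min_right _ hb), min_assoc, min_eq_right hx]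
    · exact ih a b a' b' ha hb

-- Splitting the list combines by (max, min) at the same base.
lemma fold_append (l1 l2 : List (Int × String)) (low high : Int) :
    derive_bounds_py low high (l1 ++ l2) =
      (max (derive_bounds_py low high l1).1 (derive_bounds_py low high l2).1,
       min (derive_bounds_py low high l1).2 (derive_bounds_py low high l2).2) := by
  have hsplit : derive_bounds_py low high (l1 ++ l2)
      = derive_bounds_py (derive_bounds_py low high l1).1 (derive_bounds_py low high l1).2 l2 := by
    simp [derive_bounds_py, List.foldl_append]
  have hm := fold_mono l1 low high
  rw [hsplit, fold_base l2 low high _ _ hm.1 hm.2]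

-- solveDB computes A's fold over the slice hist[i:j].
lemma solveDB_eq (low high : Int) (hist : List (Int × String)) (i j : Nat) :
    solveDB low high hist i j = derive_bounds_py low high ((hist.drop i).take (j - i)) := by
  generalize hk : j - i = k
  induction k using Nat.strong_induction_on generalizing i j with
  | _ k ih =>
    match k, hk with
    | 0, hk => rw [solveDB]; simp [hk, derive_bounds_py]
    | 1, hk =>
      rw [solveDB]
      simp only [hk]
      cases hg : hist[i]? with
      | none =>
        have hle : hist.length ≤ i := List.getElem?_eq_none_iff.mp hg
        simp [List.drop_eq_nil_of_le hle, derive_bounds_py]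
      | some p =>
        obtain ⟨hlt, hval⟩ := List.getElem?_eq_some_iff.mp hg
        have hdrop : hist.drop i = p :: hist.drop (i + 1) := by
          rw [List.drop_eq_getElem_cons hlt, hval]
        obtain ⟨g, s⟩ := p
        by_cases hL : s = "Too Low"
        · simp [hdrop, derive_bounds_py, hL]
        · by_cases hH : s = "Too High"
          · simp [hdrop, derive_bounds_py, hH]
          · simp [hdrop, derive_bounds_py, hL, hH]
    | (k + 2), hk =>
      rw [solveDB]
      have h2 : ¬ (j - i = 0) := by omega
      have h1 : ¬ (j - i = 1) := by omega
      simp only [h2, h1, if_false]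
      set m := (i + j) / 2 with hm
      have him : i < m := by omega
      have hmj : m < j := by omega
      have e1 := ih (m - i) (by omega) i m rfl
      have e2 := ih (j - m) (by omega) m j rfl
      have hslice : (hist.drop i).take (j - i)
          = (hist.drop i).take (m - i) ++ (hist.drop m).take (j - m) := by
        have hdd : (hist.drop i).drop (m - i) = hist.drop m := by
          rw [List.drop_drop]
          have hmi : i + (m - i) = m := by omega
          rw [hmi]
        have hsum : j - i = (m - i) + (j - m) := by omega
        rw [hsum, List.take_add, hdd]
      rw [hk] at hslice
      rw [e1, e2, hslice, fold_append]

-- ===== VERDICT (by name: the statement is the Claim_ definition above) =====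
theorem derive_bounds_py_spec : Claim_equal_derive_bounds_py := by
  intro low high history _
  unfold Spec_derive_bounds_py derive_bounds_py_alt
  rw [solveDB_eq]
  simp
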